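-- pv_equiv track=rewrite | github.com/nickaigi/automatic-dollop | arcade_solutions/the_core/replace_middle.py | replace_middle
-- ===== SOURCE A (Python) =====
-- def replace_middle(arr):
--     arr_len = len(arr)
--     if arr_len % 2 == 0:
--         result = []
--         mid_one = arr_len // 2 - 1
--         mid_two = mid_one + 1
--         for i in range(arr_len):
--             if i == mid_one:
--                 result.append(arr[mid_one] + arr[mid_two])
--             elif i == mid_two:
--                 continue
--             else:
--                 result.append(arr[i])
--         return result
--     return arr
-- ===== SOURCE B (Python) =====
-- def replace_middle(arr):
--     n = len(arr)
--     if n % 2 == 0 and n: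
--         mid = n // 2
--         return arr[:mid - 1] + [arr[mid - 1] + arr[mid]] + arr[mid + 1:]
--     return arr
-- ===== Notes on version B (the rewrite author's own statement) =====
-- stated objective: simpler
-- what changed: B replaces the per-index loop with its three-way branch by two bulk slices concatenated around the single summed middle element; empty/odd arrays are returned unchanged by one guard.
import Mathlib
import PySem

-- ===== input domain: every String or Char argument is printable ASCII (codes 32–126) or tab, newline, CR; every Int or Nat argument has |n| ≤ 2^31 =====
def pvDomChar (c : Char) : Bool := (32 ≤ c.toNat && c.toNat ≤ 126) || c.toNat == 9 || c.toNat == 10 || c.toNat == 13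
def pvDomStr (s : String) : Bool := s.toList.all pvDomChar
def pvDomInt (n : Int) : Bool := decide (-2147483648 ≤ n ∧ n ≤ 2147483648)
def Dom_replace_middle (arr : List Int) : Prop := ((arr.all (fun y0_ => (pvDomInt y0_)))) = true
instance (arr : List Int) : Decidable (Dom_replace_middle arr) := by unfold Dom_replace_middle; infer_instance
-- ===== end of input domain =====

-- B replaces A's per-index loop (with its three-way branch) by two bulk slices
-- concatenated around the single summed middle element; same return value, no speed claim.

-- ===== PORT A =====
-- all list indexing in A happens only when the loop runs, with indices provably in
-- range, so the total pyGetD (exact there) transliterates arr[...]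
def replace_middle (arr : List Int) : List Int :=
  let arr_len : Int := arr.length
  if PySem.Int.mod arr_len 2 = 0 then
    let mid_one := PySem.Int.floordiv arr_len 2 - 1
    let mid_two := mid_one + 1
    (PySem.List.pyRange 0 arr_len 1).foldl (fun result i =>
      if i = mid_one then
        result ++ [PySem.List.pyGetD arr mid_one 0 + PySem.List.pyGetD arr mid_two 0]
      else if i = mid_two then
        result
      else
        result ++ [PySem.List.pyGetD arr i 0]) []
  else arr

def replace_middle_alt (arr : List Int) : List Int :=
  let n : Int := arr.length
  if PySem.Int.mod n 2 = 0 ∧ n ≠ 0 then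
    let mid := PySem.Int.floordiv n 2
    PySem.List.slice arr none (some (mid - 1))
      ++ [PySem.List.pyGetD arr (mid - 1) 0 + PySem.List.pyGetD arr mid 0]
      ++ PySem.List.slice arr (some (mid + 1)) none
  else arr

-- ===== PRECONDITION & SPEC =====
def Spec_replace_middle (arr : List Int) (out : List Int) : Prop := out = replace_middle_alt arr
instance (arr : List Int) (out : List Int) : Decidable (Spec_replace_middle arr out) := by unfold Spec_replace_middle; infer_instance

-- ===== CLAIM (what is proved, stated in full; the proofs are below) =====
def Claim_equal_replace_middle : Prop := ∀ (arr : List Int), Dom_replace_middle arr → Spec_replace_middle arr (replace_middle arr)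

-- ===== LEMMAS AND PROOFS =====

-- flatMap of single-element reads over an index range is a contiguous chunk of the list
lemma flatMap_get_range (arr : List Int) (a b : Int) (ha : 0 ≤ a) (hb : b ≤ arr.length) :
    (PySem.List.pyRange a b 1).flatMap (fun i => [PySem.List.pyGetD arr i 0])
      = (arr.drop a.toNat).take (b - a).toNat := by
  by_cases h : b ≤ a
  · rw [PySem.List.pyRange_one_eq_nil h]
    have : (b - a).toNat = 0 := by omega
    simp [this]
  · rw [not_le] at h
    have hn : ((b - a).toNat) ≠ 0 := by omega
    obtain ⟨n, hn'⟩ := Nat.exists_eq_succ_of_ne_zero hn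
    clear hn
    induction n generalizing a with
    | zero =>
      rw [PySem.List.pyRange_one_cons h, PySem.List.pyRange_one_eq_nil (by omega)]
      have hlt : a.toNat < arr.length := by omega
      rw [hn', List.drop_eq_getElem_cons hlt, List.take_succ_cons, List.take_zero,
        List.flatMap_cons, List.flatMap_nil,
        PySem.List.pyGetD_eq_getElem arr 0 ha (by omega)]
      rfl
    | succ m ih =>
      rw [PySem.List.pyRange_one_cons h]
      have hlt : a.toNat < arr.length := by omega
      rw [List.flatMap_cons, ih (a + 1) (by omega) (by omega) (by omega), hn']
      have h1 : (a + 1).toNat = a.toNat + 1 := by omega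
      have h2 : (b - (a + 1)).toNat = m + 1 := by omega
      rw [h1, h2, List.drop_eq_getElem_cons hlt, List.take_succ_cons,
        PySem.List.pyGetD_eq_getElem arr 0 ha (by omega)]
      rfl

lemma A_eval (arr : List Int) (k : Nat) (hk : 1 ≤ k) (hN : arr.length = 2 * k) :
    replace_middle arr
      = arr.take (k - 1) ++ [arr.getD (k - 1) 0 + arr.getD k 0] ++ arr.drop (k + 1) := by
  have hmod : PySem.Int.mod ((arr.length : Int)) 2 = 0 := by
    rw [PySem.Int.mod_eq_emod_of_pos (by norm_num)]; omega
  have hfd : PySem.Int.floordiv ((arr.length : Int)) 2 = (k : Int) := by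
    rw [PySem.Int.floordiv_eq_ediv_of_pos (by norm_num)]; omega
  simp only [replace_middle]
  rw [if_pos hmod, hfd]
  rw [PySem.List.foldl_congr_mem _ _
    (fun result i => result ++
      (if i = (k : Int) - 1 then
        [PySem.List.pyGetD arr ((k : Int) - 1) 0 + PySem.List.pyGetD arr ((k : Int) - 1 + 1) 0]
      else if i = (k : Int) - 1 + 1 then [] else [PySem.List.pyGetD arr i 0])) []
    (by intro acc x _; dsimp only; split_ifs <;> simp)]
  rw [PySem.List.foldl_append_eq_flatMap, List.nil_append]
  rw [PySem.List.pyRange_one_append 0 ((k : Int) - 1) (arr.length : Int) (by omega) (by omega),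
    PySem.List.pyRange_one_cons (a := (k : Int) - 1) (b := (arr.length : Int)) (by omega),
    PySem.List.pyRange_one_cons (a := (k : Int) - 1 + 1) (b := (arr.length : Int)) (by omega)]
  rw [List.flatMap_append, List.flatMap_cons, List.flatMap_cons]
  rw [if_pos rfl, if_neg (by omega), if_pos rfl]
  rw [List.flatMap_congr (l := PySem.List.pyRange 0 ((k : Int) - 1))
      (g := fun i => [PySem.List.pyGetD arr i 0])
      (by intro x hx; rw [PySem.List.mem_pyRange_one] at hx
          rw [if_neg (by omega), if_neg (by omega)]),
    List.flatMap_congr (l := PySem.List.pyRange ((k : Int) - 1 + 1 + 1) (arr.length : Int))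
      (g := fun i => [PySem.List.pyGetD arr i 0])
      (by intro x hx; rw [PySem.List.mem_pyRange_one] at hx
          rw [if_neg (by omega), if_neg (by omega)]),
    flatMap_get_range arr 0 ((k : Int) - 1) (by omega) (by omega),
    flatMap_get_range arr ((k : Int) - 1 + 1 + 1) (arr.length : Int) (by omega) (by omega)]
  have e1 : (((k : Int) - 1) - 0).toNat = k - 1 := by omega
  have e2 : (((k : Int)) - 1 + 1 + 1).toNat = k + 1 := by omega
  have e3 : ((arr.length : Int) - ((k : Int) - 1 + 1 + 1)).toNat = arr.length - (k + 1) := by omega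
  have c2 : ((k : Int)) - 1 + 1 = ((k : Nat) : Int) := by omega
  have c1 : ((k : Int)) - 1 = (((k - 1 : Nat)) : Int) := by omega
  rw [e1, e2, e3, Int.toNat_zero, List.drop_zero,
    List.take_of_length_le (l := List.drop (k + 1) arr) (i := arr.length - (k + 1)) (by rw [List.length_drop]), c2, c1]
  simp

lemma B_eval (arr : List Int) (k : Nat) (hk : 1 ≤ k) (hN : arr.length = 2 * k) :
    replace_middle_alt arr
      = arr.take (k - 1) ++ [arr.getD (k - 1) 0 + arr.getD k 0] ++ arr.drop (k + 1) := by
  have hmod : PySem.Int.mod ((arr.length : Int)) 2 = 0 := by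
    rw [PySem.Int.mod_eq_emod_of_pos (by norm_num)]; omega
  have hfd : PySem.Int.floordiv ((arr.length : Int)) 2 = (k : Int) := by
    rw [PySem.Int.floordiv_eq_ediv_of_pos (by norm_num)]; omega
  simp only [replace_middle_alt]
  have c1 : ((k : Int)) - 1 = (((k - 1 : Nat)) : Int) := by omega
  have g2 : (((k : Int)) + 1).toNat = k + 1 := by omega
  rw [if_pos ⟨hmod, show ((arr.length : Int)) ≠ 0 by omega⟩, hfd,
    PySem.List.slice_to arr (by omega), PySem.List.slice_from arr (by omega), c1, g2]
  simp

theorem replace_middle_eq (arr : List Int) : replace_middle arr = replace_middle_alt arr := by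
  by_cases hodd : (arr.length) % 2 = 0
  · by_cases hnil : arr.length = 0
    · have : arr = [] := List.length_eq_zero_iff.mp hnil
      subst this; rfl
    · obtain ⟨k, hk⟩ : ∃ k, arr.length = 2 * k := ⟨arr.length / 2, by omega⟩
      rw [A_eval arr k (by omega) hk, B_eval arr k (by omega) hk]
  · have hm : ¬ PySem.Int.mod ((arr.length : Int)) 2 = 0 := by
      rw [PySem.Int.mod_eq_emod_of_pos (by norm_num)]; omega
    simp only [replace_middle, replace_middle_alt]
    rw [if_neg hm, if_neg (by tauto)]

-- ===== VERDICT (by name: the statement is the Claim_ definition above) =====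
theorem replace_middle_spec : Claim_equal_replace_middle := by
  intro arr _
  unfold Spec_replace_middle
  exact replace_middle_eq arr
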